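-- pv_equiv track=rewrite | github.com/gonzaherman99/C4533-GroupProject | problem1_task1_2_3.py | brute_force_p1
-- ===== SOURCE A (Python) =====
-- def brute_force_p1(A):
-- 	"""
-- 	Brute force solution for single transaction
-- 	Time Complexity: O(m * n^2)
--
-- 	Approach:
-- 		- Iterate through all stocks
-- 		- For each stock, check all possible buy-sell day combinations
-- 		- Track the transaction with maximum profit
-- 	Assume:
-- 		- Matrix A contains valid numerical data
-- 		- Days are in chronological order (columns 0 to n-1)
-- 	"""
-- 	m, n = len(A), len(A[0])
-- 	best_profit = 0
-- 	best_stock, best_buy, best_sell = -1, -1, -1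
--
-- 	# Iterate through all stocks
-- 	for i in range(m):
-- 		# Check all possible buy days
-- 		for buy in range(n):
-- 			# Check all possible sell days AFTER buy day
-- 			for sell in range(buy + 1, n):
-- 				# Calculate potential profit
-- 				profit = A[i][sell] - A[i][buy]
--
-- 				# Update best transaction if better profit is found
-- 				if profit > best_profit:
-- 					best_profit = profit
-- 					best_stock, best_buy, best_sell = i, buy, sell
--
-- 	# Return (0, 0, 0, 0) if there are no profitable transactions
-- 	if best_profit <= 0:
-- 		return (0, 0, 0, 0)
--
-- 	# Convert to 1-based index and return
-- 	return (best_stock + 1, best_buy + 1, best_sell + 1, best_profit)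
-- ===== SOURCE B (Python) =====
-- def brute_force_p1(A):
-- 	"""
-- 	Single-transaction best trade, one linear running-minimum scan per stock
-- 	(O(m*n) instead of O(m*n^2)); same result and tie-breaking as the brute force.
-- 	"""
-- 	n = len(A[0])
-- 	best = (0, 0, 0, 0)
-- 	best_profit = 0
-- 	for i, row in enumerate(A):
-- 		min_val = None
-- 		min_idx = 0
-- 		for j in range(n):
-- 			v = row[j]
-- 			if min_val is not None and v - min_val > best_profit:
-- 				best_profit = v - min_val
-- 				best = (i + 1, min_idx + 1, j + 1, best_profit)
-- 			if min_val is None or v < min_val: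
-- 				min_val, min_idx = v, j
-- 	return best
-- ===== Notes on version B (the rewrite author's own statement) =====
-- stated objective: faster
-- what changed: Replaces the O(m*n^2) all-pairs buy/sell scan per stock by a single running-minimum pass per stock (tracking the minimum price and its first index), reproducing A's exact result and tie-breaking (first stock, then smallest buy, then smallest sell).
-- outside the precondition, e.g. on brute_force_p1([[5], []]): A returns (0, 0, 0, 0), B raises IndexError
import Mathlib
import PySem

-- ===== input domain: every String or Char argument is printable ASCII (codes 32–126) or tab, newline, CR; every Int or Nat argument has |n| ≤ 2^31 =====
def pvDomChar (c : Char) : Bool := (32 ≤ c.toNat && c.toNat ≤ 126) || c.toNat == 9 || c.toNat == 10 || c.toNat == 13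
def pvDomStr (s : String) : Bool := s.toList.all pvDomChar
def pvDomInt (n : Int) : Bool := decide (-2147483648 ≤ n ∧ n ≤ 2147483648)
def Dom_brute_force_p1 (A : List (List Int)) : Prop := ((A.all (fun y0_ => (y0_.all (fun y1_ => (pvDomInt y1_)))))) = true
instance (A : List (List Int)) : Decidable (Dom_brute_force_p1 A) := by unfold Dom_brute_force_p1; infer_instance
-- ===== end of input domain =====

-- B replaces A's O(m·n²) all-pairs buy/sell scan by one running-minimum pass per stock; same result and tie-breaking.

-- ===== PORT A =====
def brute_force_p1 (A : List (List Int)) : List Int :=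
  let m : Int := A.length
  let n : Int := (PySem.List.pyGetD A 0 []).length
  let st : Int × Int × Int × Int :=
    (PySem.List.pyRange 0 m 1).foldl (fun st i =>
      (PySem.List.pyRange 0 n 1).foldl (fun st buy =>
        (PySem.List.pyRange (buy + 1) n 1).foldl (fun st sell =>
          let profit : Int :=
            PySem.List.pyGetD (PySem.List.pyGetD A i []) sell 0
              - PySem.List.pyGetD (PySem.List.pyGetD A i []) buy 0
          if profit > st.2.2.2 then (i, buy, sell, profit) else st) st) st)
      ((-1 : Int), (-1 : Int), (-1 : Int), (0 : Int))
  if st.2.2.2 ≤ 0 then [0, 0, 0, 0]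
  else [st.1 + 1, st.2.1 + 1, st.2.2.1 + 1, st.2.2.2]

-- ===== PORT B =====
def brute_force_p1_alt (A : List (List Int)) : List Int :=
  let n : Int := (PySem.List.pyGetD A 0 []).length
  let st : Int × Int × Int × Int :=
    (PySem.List.enumerate A 0).foldl (fun best p =>
      ((PySem.List.pyRange 0 n 1).foldl
        (fun (st : (Option Int × Int) × (Int × Int × Int × Int)) j =>
          let v := PySem.List.pyGetD p.2 j 0
          let st :=
            match st.1.1 with
            | some mv =>
                if v - mv > st.2.2.2.2 then (st.1, (p.1 + 1, st.1.2 + 1, j + 1, v - mv))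
                else st
            | none => st
          match st.1.1 with
          | none => ((some v, j), st.2)
          | some mv => if v < mv then ((some v, j), st.2) else st)
        (((none : Option Int), (0 : Int)), best)).2)
      ((0 : Int), (0 : Int), (0 : Int), (0 : Int))
  [st.1, st.2.1, st.2.2.1, st.2.2.2]

-- ===== PRECONDITION & SPEC =====
-- Pre_ excludes exactly the inputs on which an IndexError is raised: an empty matrix (A[0] in both
-- programs) and matrices with a row shorter than the first row (A reads A[i][sell] for sell < n, and
-- in the degenerate n = 1 ragged case, where A happens to return, B's own scan still reads row[0]).
def Pre_brute_force_p1 (A : List (List Int)) : Prop :=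
  A ≠ [] ∧ ∀ r ∈ A, (A.headD []).length ≤ r.length
instance (A : List (List Int)) : Decidable (Pre_brute_force_p1 A) := by
  unfold Pre_brute_force_p1; infer_instance
def pvWitness_brute_force_p1 : List (List Int) := [[3, 1, 4], [2, 7, 1]]
def Spec_brute_force_p1 (A : List (List Int)) (out : List Int) : Prop := out = brute_force_p1_alt A
instance (A : List (List Int)) (out : List Int) : Decidable (Spec_brute_force_p1 A out) := by
  unfold Spec_brute_force_p1; infer_instance

-- ===== CLAIM (what is proved, stated in full; the proofs are below) =====
def Claim_equal_brute_force_p1 : Prop := ∀ (A : List (List Int)), Dom_brute_force_p1 A → Pre_brute_force_p1 A → Spec_brute_force_p1 A (brute_force_p1 A)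

-- ===== LEMMAS AND PROOFS =====

-- best-transaction candidates and the strict-improvement update both programs perform
def pvP (c : Int × Int × Int × Int) : Int := c.2.2.2

def pvUpd (st c : Int × Int × Int × Int) : Int × Int × Int × Int :=
  if pvP c > pvP st then c else st

def pvShift (c : Int × Int × Int × Int) : Int × Int × Int × Int :=
  (c.1 + 1, c.2.1 + 1, c.2.2.1 + 1, c.2.2.2)

def pvBest? : List (Int × Int × Int × Int) → Option (Int × Int × Int × Int)
  | [] => none
  | c :: cs => some (match pvBest? cs with
      | none => c
      | some d => if pvP d > pvP c then d else c)

-- running minimum (value, first index) of g over the first k positions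
def pvMin (g : Int → Int) : Nat → Option Int × Int
  | 0 => ((none : Option Int), (0 : Int))
  | k + 1 =>
    match (pvMin g k).1 with
    | none => (some (g k), (k : Int))
    | some mv => if g k < mv then (some (g k), (k : Int)) else pvMin g k

def pvCand (g : Int → Int) (i : Int) (j : Nat) : Int × Int × Int × Int :=
  (i, (pvMin g j).2, (j : Int), g j - ((pvMin g j).1).getD 0)

def pvCamA (g : Int → Int) (n : Nat) (i : Int) : List (Int × Int × Int × Int) :=
  (PySem.List.pyRange 0 (n : Int) 1).flatMap (fun b =>
    (PySem.List.pyRange (b + 1) (n : Int) 1).map (fun s => (i, b, s, g s - g b)))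

def pvCamB (g : Int → Int) (i : Int) : Nat → List (Int × Int × Int × Int)
  | 0 => []
  | k + 1 => pvCamB g i k ++ (match (pvMin g k).1 with
      | none => []
      | some mv => [(i, (pvMin g k).2, (k : Int), g k - mv)])

def pvLex (x y : Int × Int × Int × Int) : Prop :=
  x.2.1 < y.2.1 ∨ (x.2.1 = y.2.1 ∧ x.2.2.1 < y.2.2.1)

lemma pvBest?_none (cs : List (Int × Int × Int × Int)) : pvBest? cs = none ↔ cs = [] := by
  cases cs <;> simp [pvBest?]

lemma pvBest?_mem {cs : List (Int × Int × Int × Int)} {c : Int × Int × Int × Int}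
    (h : pvBest? cs = some c) : c ∈ cs := by
  induction cs with
  | nil => simp [pvBest?] at h
  | cons a t ih =>
    simp only [pvBest?, Option.some.injEq] at h
    cases ht : pvBest? t with
    | none => rw [ht] at h; simp [← h]
    | some d =>
      rw [ht] at h
      dsimp only at h
      by_cases hpd : pvP d > pvP a
      · rw [if_pos hpd] at h; exact List.mem_cons_of_mem _ (ih (h ▸ ht))
      · rw [if_neg hpd] at h; simp [← h]

lemma pvBest?_iff (cs : List (Int × Int × Int × Int)) (c : Int × Int × Int × Int) :
    pvBest? cs = some c ↔
      ∃ l1 l2, cs = l1 ++ c :: l2 ∧ (∀ x ∈ l1, pvP x < pvP c) ∧ (∀ x ∈ l2, pvP x ≤ pvP c) := by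
  induction cs generalizing c with
  | nil =>
    constructor
    · intro h; simp [pvBest?] at h
    · rintro ⟨l1, l2, e, -, -⟩; exact absurd e (by simp)
  | cons a t ih =>
    constructor
    · intro h
      simp only [pvBest?, Option.some.injEq] at h
      cases ht : pvBest? t with
      | none =>
        have hte : t = [] := (pvBest?_none t).mp ht
        rw [ht] at h; dsimp only at h
        subst h; subst hte
        exact ⟨[], [], rfl, by simp, by simp⟩
      | some d =>
        rw [ht] at h; dsimp only at h
        by_cases hpd : pvP d > pvP a
        · rw [if_pos hpd] at h
          obtain ⟨l1, l2, e, p1, p2⟩ := (ih d).mp ht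
          subst h
          refine ⟨a :: l1, l2, by simp [e], ?_, p2⟩
          intro x hx
          rcases List.mem_cons.mp hx with rfl | hx
          · omega
          · exact p1 x hx
        · rw [if_neg hpd] at h
          subst h
          obtain ⟨l1, l2, e, p1, p2⟩ := (ih d).mp ht
          refine ⟨[], t, rfl, by simp, ?_⟩
          intro x hx
          rw [e] at hx
          rcases List.mem_append.mp hx with hx | hx
          · have := p1 x hx; omega
          · rcases List.mem_cons.mp hx with rfl | hx
            · omega
            · have := p2 x hx; omega
    · rintro ⟨l1, l2, e, p1, p2⟩
      cases l1 with
      | nil =>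
        simp only [List.nil_append, List.cons.injEq] at e
        obtain ⟨rfl, rfl⟩ := e
        simp only [pvBest?]
        cases ht : pvBest? t with
        | none => rfl
        | some d =>
          have hd : pvP d ≤ pvP a := p2 d (pvBest?_mem ht)
          dsimp only
          rw [if_neg (by omega)]
      | cons b l1' =>
        simp only [List.cons_append, List.cons.injEq] at e
        obtain ⟨rfl, et⟩ := e
        have ha : pvP a < pvP c := p1 a (by simp)
        have ht' : pvBest? t = some c :=
          (ih c).mpr ⟨l1', l2, et, fun x hx => p1 x (List.mem_cons_of_mem _ hx), p2⟩
        simp only [pvBest?]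
        rw [ht']
        dsimp only
        rw [if_pos (by omega)]

lemma pvBest?_max {cs : List (Int × Int × Int × Int)} {c : Int × Int × Int × Int}
    (h : pvBest? cs = some c) : ∀ x ∈ cs, pvP x ≤ pvP c := by
  obtain ⟨l1, l2, rfl, p1, p2⟩ := (pvBest?_iff cs c).mp h
  intro x hx
  rcases List.mem_append.mp hx with hx | hx
  · exact le_of_lt (p1 x hx)
  · rcases List.mem_cons.mp hx with rfl | hx
    · exact le_refl _
    · exact p2 x hx

lemma pvFoldlUpd (cs : List (Int × Int × Int × Int)) (st : Int × Int × Int × Int) :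
    List.foldl pvUpd st cs =
      match pvBest? cs with
      | none => st
      | some d => if pvP d > pvP st then d else st := by
  induction cs generalizing st with
  | nil => simp [pvBest?]
  | cons a t ih =>
    simp only [List.foldl_cons, pvBest?]
    rw [ih (pvUpd st a)]
    cases ht : pvBest? t with
    | none =>
      have := (pvBest?_none t).mp ht
      subst this
      simp [pvUpd]
    | some d =>
      dsimp only
      unfold pvUpd
      split_ifs <;> first | rfl | (exfalso; omega)

lemma pvFoldl_profit (cs : List (Int × Int × Int × Int)) (st : Int × Int × Int × Int) :
    pvP st ≤ pvP (List.foldl pvUpd st cs) ∧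
      (pvP (List.foldl pvUpd st cs) ≤ pvP st → List.foldl pvUpd st cs = st) := by
  rw [pvFoldlUpd]
  cases pvBest? cs with
  | none => simp
  | some d =>
    dsimp only
    split_ifs with h
    · exact ⟨by omega, fun hh => by exfalso; omega⟩
    · exact ⟨by omega, fun _ => rfl⟩

lemma pvUpd_shift (st c : Int × Int × Int × Int) :
    pvUpd (pvShift st) (pvShift c) = pvShift (pvUpd st c) := by
  unfold pvUpd pvShift pvP
  dsimp only
  split_ifs <;> simp_all

lemma pvFoldl_shift (cs : List (Int × Int × Int × Int)) (st : Int × Int × Int × Int) :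
    List.foldl pvUpd (pvShift st) (cs.map pvShift) = pvShift (List.foldl pvUpd st cs) := by
  rw [List.foldl_map]
  induction cs generalizing st with
  | nil => simp
  | cons a t ih => simp only [List.foldl_cons, pvUpd_shift, ih]

lemma pvOuter (l : List Int) (f : Int → List (Int × Int × Int × Int)) (st : Int × Int × Int × Int) :
    l.foldl (fun acc j => List.foldl pvUpd acc ((f j).map pvShift)) (pvShift st)
      = pvShift (l.foldl (fun acc j => List.foldl pvUpd acc (f j)) st) := by
  induction l generalizing st with
  | nil => simp
  | cons a t ih => simp only [List.foldl_cons, pvFoldl_shift, ih]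

lemma pvOuterProfit (l : List Int) (f : Int → List (Int × Int × Int × Int)) (st : Int × Int × Int × Int) :
    pvP st ≤ pvP (l.foldl (fun acc j => List.foldl pvUpd acc (f j)) st) ∧
      (pvP (l.foldl (fun acc j => List.foldl pvUpd acc (f j)) st) ≤ pvP st →
        l.foldl (fun acc j => List.foldl pvUpd acc (f j)) st = st) := by
  induction l generalizing st with
  | nil => simp
  | cons a t ih =>
    simp only [List.foldl_cons]
    obtain ⟨h1a, h1b⟩ := pvFoldl_profit (f a) st
    obtain ⟨h2a, h2b⟩ := ih (List.foldl pvUpd st (f a))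
    refine ⟨by omega, fun h => ?_⟩
    have e1 : List.foldl pvUpd st (f a) = st := h1b (by omega)
    rw [e1] at h h2a h2b ⊢
    exact h2b h

lemma pvMin_spec (g : Int → Int) (k : Nat) (hk : 1 ≤ k) :
    ∃ mi : Nat, pvMin g k = (some (g mi), (mi : Int)) ∧ mi < k ∧
      (∀ t : Nat, t < k → g mi ≤ g t) ∧ (∀ t : Nat, t < mi → g mi < g t) := by
  induction k with
  | zero => omega
  | succ k ih =>
    by_cases hk0 : k = 0
    · subst hk0
      refine ⟨0, by simp [pvMin], by omega, ?_, by omega⟩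
      intro t ht
      have : t = 0 := by omega
      subst this; exact le_refl _
    · obtain ⟨mi, e, hlt, hmin, hstrict⟩ := ih (by omega)
      by_cases hlt2 : g k < g mi
      · refine ⟨k, ?_, by omega, ?_, ?_⟩
        · simp only [pvMin]
          rw [e]
          dsimp only
          rw [if_pos hlt2]
        · intro t ht
          by_cases htk : t = k
          · subst htk; exact le_refl _
          · have := hmin t (by omega); omega
        · intro t ht
          have := hmin t ht; omega
      · refine ⟨mi, ?_, by omega, ?_, hstrict⟩
        · simp only [pvMin]
          rw [e]
          dsimp only
          rw [if_neg hlt2]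
        · intro t ht
          by_cases htk : t = k
          · subst htk; omega
          · exact hmin t (by omega)

lemma pvCamB_eq (g : Int → Int) (i : Int) (k : Nat) :
    pvCamB g i (k + 1) = (List.range' 1 k).map (pvCand g i) := by
  induction k with
  | zero => simp [pvCamB, pvMin]
  | succ k ih =>
    obtain ⟨mi, e, -, -, -⟩ := pvMin_spec g (k + 1) (by omega)
    conv_lhs => rw [pvCamB]
    rw [ih, e, List.range'_concat]
    dsimp only
    have h1k : (1 : Nat) + k = k + 1 := Nat.add_comm 1 k
    have hcast : ((k + 1 : Nat) : Int) = (k : Int) + 1 := by push_cast; ring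
    simp [pvCand, e, h1k, hcast]

lemma pvCamA_mem (g : Int → Int) (n : Nat) (i : Int) (x : Int × Int × Int × Int) :
    x ∈ pvCamA g n i ↔ ∃ b s : Int, 0 ≤ b ∧ b < s ∧ s < (n : Int) ∧ x = (i, b, s, g s - g b) := by
  simp only [pvCamA, List.mem_flatMap, List.mem_map, PySem.List.mem_pyRange_one]
  constructor
  · rintro ⟨b, ⟨hb0, hbn⟩, s, ⟨hs1, hs2⟩, rfl⟩
    exact ⟨b, s, hb0, by omega, hs2, rfl⟩
  · rintro ⟨b, s, hb0, hbs, hsn, rfl⟩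
    exact ⟨b, ⟨hb0, by omega⟩, s, ⟨by omega, hsn⟩, rfl⟩

lemma pvCamA_pairwise (g : Int → Int) (n : Nat) (i : Int) :
    (pvCamA g n i).Pairwise pvLex := by
  rw [pvCamA, List.pairwise_flatMap]
  constructor
  · intro b hb
    rw [List.pairwise_map]
    exact (PySem.List.pairwise_lt_pyRange_one _ _).imp (fun h => Or.inr ⟨rfl, h⟩)
  · refine (PySem.List.pairwise_lt_pyRange_one _ _).imp ?_
    intro b1 b2 hlt x hx y hy
    simp only [List.mem_map] at hx hy
    obtain ⟨s1, -, rfl⟩ := hx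
    obtain ⟨s2, -, rfl⟩ := hy
    exact Or.inl hlt

lemma pvCore (g : Int → Int) (i : Int) (n : Nat) :
    pvBest? (pvCamA g n i) = pvBest? (pvCamB g i n) := by
  by_cases hn : n < 2
  · interval_cases n
    · have h0 : PySem.List.pyRange (0 : Int) 0 1 = [] := by decide
      simp [pvCamA, pvCamB, pvBest?, h0]
    · have h1 : PySem.List.pyRange (0 : Int) 1 1 = [(0 : Int)] := by decide
      have h2 : PySem.List.pyRange (1 : Int) 1 1 = [] := by decide
      simp [pvCamA, pvCamB, pvMin, pvBest?, h1, h2]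
  · replace hn : 2 ≤ n := by omega
    have hmem01 : (i, 0, 1, g 1 - g 0) ∈ pvCamA g n i :=
      (pvCamA_mem g n i _).mpr ⟨0, 1, by omega, by omega, by omega, rfl⟩
    obtain ⟨c, hc⟩ : ∃ c, pvBest? (pvCamA g n i) = some c := by
      cases hbc : pvBest? (pvCamA g n i) with
      | none =>
        rw [pvBest?_none] at hbc
        rw [hbc] at hmem01
        simp at hmem01
      | some c => exact ⟨c, rfl⟩
    obtain ⟨b1, s1, hb1, hbs, hs1, hcform⟩ := (pvCamA_mem g n i c).mp (pvBest?_mem hc)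
    have hmax : ∀ b s : Int, 0 ≤ b → b < s → s < (n : Int) → g s - g b ≤ pvP c := by
      intro b s h1 h2 h3
      have := pvBest?_max hc _ ((pvCamA_mem g n i _).mpr ⟨b, s, h1, h2, h3, rfl⟩)
      simpa [pvP] using this
    have hM : pvP c = g s1 - g b1 := by rw [hcform]; rfl
    have hlex : ∀ b s : Int, 0 ≤ b → b < s → s < (n : Int) →
        (b < b1 ∨ (b = b1 ∧ s < s1)) → g s - g b < pvP c := by
      intro b s h1 h2 h3 hbefore
      obtain ⟨l1, l2, edec, p1, p2⟩ := (pvBest?_iff _ _).mp hc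
      have hx : (i, b, s, g s - g b) ∈ pvCamA g n i :=
        (pvCamA_mem g n i _).mpr ⟨b, s, h1, h2, h3, rfl⟩
      rw [edec] at hx
      rcases List.mem_append.mp hx with hx | hx
      · simpa [pvP] using p1 _ hx
      · rcases List.mem_cons.mp hx with hxc | hx
        · rw [hcform] at hxc
          simp only [Prod.mk.injEq] at hxc
          exfalso
          omega
        · have hpw := pvCamA_pairwise g n i
          rw [edec] at hpw
          have hcx : pvLex c (i, b, s, g s - g b) :=
            (List.pairwise_cons.mp (List.pairwise_append.mp hpw).2.1).1 _ hx
          rw [hcform] at hcx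
          simp only [pvLex] at hcx
          exfalso
          omega
    lift b1 to Nat using hb1 with b1n hb1n
    lift s1 to Nat using (by omega) with s1n hs1n
    obtain ⟨mi, e, hmlt, hmin, hstrict⟩ := pvMin_spec g s1n (by omega)
    have hmieq : mi = b1n := by
      rcases Nat.lt_trichotomy mi b1n with h | h | h
      · exfalso
        have h1 := hlex (mi : Int) (s1n : Int) (by omega) (by omega) (by omega)
          (Or.inl (by exact_mod_cast h))
        have h2 := hmin b1n (by omega)
        omega
      · exact h
      · exfalso
        have h2 := hstrict b1n h
        have h3 := hmax (mi : Int) (s1n : Int) (by omega) (by omega) (by omega)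
        omega
    subst hmieq
    have hcand : pvCand g i s1n = c := by
      rw [pvCand, e, hcform]
      simp
    have hlow : ∀ j : Nat, 1 ≤ j → j < s1n → pvP (pvCand g i j) < pvP c := by
      intro j hj1 hj2
      obtain ⟨mj, ej, hmjlt, hminj, hstrictj⟩ := pvMin_spec g j hj1
      have hpj : pvP (pvCand g i j) = g j - g mj := by simp [pvCand, pvP, ej]
      rw [hpj]
      rcases Nat.lt_trichotomy mj mi with h | h | h
      · exact hlex _ _ (by omega) (by omega) (by omega) (Or.inl (by exact_mod_cast h))
      · subst h
        exact hlex _ _ (by omega) (by omega) (by omega) (Or.inr ⟨rfl, by exact_mod_cast hj2⟩)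
      · exfalso
        have h2 := hstrictj mi h
        have h3 := hmax (mj : Int) (s1n : Int) (by omega) (by omega) (by omega)
        omega
    have hhigh : ∀ j : Nat, s1n < j → j < n → pvP (pvCand g i j) ≤ pvP c := by
      intro j hj1 hj2
      obtain ⟨mj, ej, hmjlt, -, -⟩ := pvMin_spec g j (by omega)
      have hpj : pvP (pvCand g i j) = g j - g mj := by simp [pvCand, pvP, ej]
      rw [hpj]
      exact hmax _ _ (by omega) (by omega) (by omega)
    obtain ⟨n', rfl⟩ : ∃ n', n = n' + 1 := ⟨n - 1, by omega⟩
    rw [hc, pvCamB_eq]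
    have e1 : (1 : Nat) + 1 * (s1n - 1) = s1n := by omega
    have e3 : n' - (s1n - 1) = (n' - s1n) + 1 := by omega
    have hsplit : List.range' 1 n' =
        List.range' 1 (s1n - 1) ++ s1n :: List.range' (s1n + 1) (n' - s1n) := by
      have e2 : n' = (s1n - 1) + (n' - (s1n - 1)) := by omega
      conv_lhs => rw [e2, ← List.range'_append]
      rw [e1, e3, List.range'_succ]
    rw [hsplit, List.map_append, List.map_cons]
    refine ((pvBest?_iff _ _).mpr ⟨_, _, by rw [hcand], ?_, ?_⟩).symm
    · intro x hx
      obtain ⟨j, hj, rfl⟩ := List.mem_map.mp hx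
      rw [List.mem_range'_1] at hj
      exact hlow j hj.1 (by omega)
    · intro x hx
      obtain ⟨j, hj, rfl⟩ := List.mem_map.mp hx
      rw [List.mem_range'_1] at hj
      exact hhigh j (by omega) (by omega)

lemma pvRowEq (g : Int → Int) (i : Int) (n : Nat) (st : Int × Int × Int × Int) :
    List.foldl pvUpd st (pvCamA g n i) = List.foldl pvUpd st (pvCamB g i n) := by
  rw [pvFoldlUpd, pvFoldlUpd, pvCore]

lemma pvInnerA (row : List Int) (i : Int) (n : Nat) (st : Int × Int × Int × Int) :
    (PySem.List.pyRange 0 (n : Int) 1).foldl (fun st buy =>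
      (PySem.List.pyRange (buy + 1) (n : Int) 1).foldl (fun st sell =>
        let profit : Int := PySem.List.pyGetD row sell 0 - PySem.List.pyGetD row buy 0
        if profit > st.2.2.2 then (i, buy, sell, profit) else st) st) st
    = List.foldl pvUpd st (pvCamA (fun j => PySem.List.pyGetD row j 0) n i) := by
  rw [pvCamA, List.foldl_flatMap]
  apply PySem.List.foldl_congr_mem
  intro acc b hb
  rw [List.foldl_map]
  rfl

lemma pvInnerB (row : List Int) (i : Int) (n : Nat) (best : Int × Int × Int × Int) :
    (PySem.List.pyRange 0 (n : Int) 1).foldl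
      (fun (st : (Option Int × Int) × (Int × Int × Int × Int)) j =>
        let v := PySem.List.pyGetD row j 0
        let st :=
          match st.1.1 with
          | some mv =>
              if v - mv > st.2.2.2.2 then (st.1, (i + 1, st.1.2 + 1, j + 1, v - mv))
              else st
          | none => st
        match st.1.1 with
        | none => ((some v, j), st.2)
        | some mv => if v < mv then ((some v, j), st.2) else st)
      (((none : Option Int), (0 : Int)), best)
    = (pvMin (fun j => PySem.List.pyGetD row j 0) n,
       List.foldl pvUpd best
         ((pvCamB (fun j => PySem.List.pyGetD row j 0) i n).map pvShift)) := by
  induction n with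
  | zero =>
    rw [show ((0 : Nat) : Int) = 0 from rfl, PySem.List.pyRange_one_eq_nil (le_refl 0)]
    simp [pvCamB, pvMin]
  | succ n ih =>
    have hc : ((n + 1 : Nat) : Int) = (n : Int) + 1 := by push_cast; ring
    rw [hc, PySem.List.pyRange_one_succ_right (by exact_mod_cast Nat.zero_le n),
      List.foldl_append, ih]
    simp only [List.foldl_cons, List.foldl_nil]
    by_cases hn0 : n = 0
    · subst hn0
      simp [pvMin, pvCamB]
    · obtain ⟨mi, e, -, -, -⟩ := pvMin_spec (fun j => PySem.List.pyGetD row j 0) n (by omega)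
      conv_rhs => rw [pvCamB]
      simp only [e, List.map_append, List.foldl_append]
      conv_rhs => rw [pvMin]
      rw [e]
      simp only [List.foldl_cons, List.foldl_nil, pvUpd, pvShift, pvP]
      split_ifs <;> simp_all [pvUpd, pvShift, pvP] <;>
        try (split_ifs <;> simp_all) <;> try omega

lemma pvMain (A : List (List Int)) : brute_force_p1 A = brute_force_p1_alt A := by
  obtain ⟨hge, heq⟩ := pvOuterProfit (PySem.List.pyRange 0 ((A.length : Nat) : Int) 1)
    (fun i => pvCamB (fun t => PySem.List.pyGetD (PySem.List.pyGetD A i []) t 0) i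
      ((PySem.List.pyGetD A 0 []).length))
    (-1, -1, -1, 0)
  set n : Nat := (PySem.List.pyGetD A 0 []).length with hn
  set R : Int × Int × Int × Int :=
    (PySem.List.pyRange 0 ((A.length : Nat) : Int) 1).foldl
      (fun st i =>
        List.foldl pvUpd st
          (pvCamB (fun t => PySem.List.pyGetD (PySem.List.pyGetD A i []) t 0) i n))
      (-1, -1, -1, 0) with hRdef
  have hA : brute_force_p1 A =
      if pvP R ≤ 0 then [0, 0, 0, 0]
      else [R.1 + 1, R.2.1 + 1, R.2.2.1 + 1, R.2.2.2] := by
    unfold brute_force_p1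
    dsimp only
    rw [PySem.List.foldl_congr_mem _ _
      (fun st i =>
        List.foldl pvUpd st
          (pvCamB (fun t => PySem.List.pyGetD (PySem.List.pyGetD A i []) t 0) i n))
      (-1, -1, -1, 0)
      (fun acc x _ => by rw [pvInnerA]; exact pvRowEq _ _ _ _)]
    rfl
  have hB : brute_force_p1_alt A = [(pvShift R).1, (pvShift R).2.1, (pvShift R).2.2.1, (pvShift R).2.2.2] := by
    unfold brute_force_p1_alt
    dsimp only
    rw [PySem.List.enumerate_eq_map_pyRange A [], List.foldl_map, PySem.List.len_eq]
    rw [PySem.List.foldl_congr_mem _ _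
      (fun best (j : Int) =>
        List.foldl pvUpd best
          ((pvCamB (fun t => PySem.List.pyGetD (PySem.List.pyGetD A j []) t 0) j n).map pvShift))
      ((0 : Int), (0 : Int), (0 : Int), (0 : Int))
      (fun acc x _ => congrArg Prod.snd (pvInnerB (PySem.List.pyGetD A x []) x n acc))]
    rw [show ((0 : Int), (0 : Int), (0 : Int), (0 : Int)) = pvShift (-1, -1, -1, 0) from rfl]
    rw [pvOuter]
  rw [hA, hB]
  by_cases h0 : pvP R ≤ 0
  · have hr0 : R = (-1, -1, -1, 0) := heq (by
      have : pvP ((-1, -1, -1, 0) : Int × Int × Int × Int) = 0 := rfl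
      omega)
    rw [if_pos h0, hr0]
    rfl
  · rw [if_neg h0]
    rfl

-- ===== VERDICT (by name: the statement is the Claim_ definition above) =====
theorem brute_force_p1_spec : Claim_equal_brute_force_p1 := by
  intro A _ _
  exact pvMain A
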